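-- pv_equiv track=rewrite | github.com/Bo-Yasser/Learn-Data | Python/CodeForces/ZeroWeb/1.py | sum_of_differences
-- ===== SOURCE A (Python) =====
-- def sum_of_differences(arr):
--     index = arr[0]
--     list = []
--     if len(arr) > 0:
--         for a in arr[1:]:
--             index -= a
--             for i in arr[:]:
--                 index += a
--         return index
-- ===== SOURCE B (Python) =====
-- def sum_of_differences(arr):
--     # Each tail element a is subtracted once then added len(arr) times,
--     # so the result is arr[0] + (len(arr)-1) * sum(arr[1:]).
--     return arr[0] + (len(arr) - 1) * sum(arr[1:])
-- ===== Notes on version B (the rewrite author's own statement) =====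
-- stated objective: faster
-- what changed: Replaced the quadratic nested accumulation loops with the closed form arr[0] + (len(arr)-1)*sum(arr[1:]).
import Mathlib
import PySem

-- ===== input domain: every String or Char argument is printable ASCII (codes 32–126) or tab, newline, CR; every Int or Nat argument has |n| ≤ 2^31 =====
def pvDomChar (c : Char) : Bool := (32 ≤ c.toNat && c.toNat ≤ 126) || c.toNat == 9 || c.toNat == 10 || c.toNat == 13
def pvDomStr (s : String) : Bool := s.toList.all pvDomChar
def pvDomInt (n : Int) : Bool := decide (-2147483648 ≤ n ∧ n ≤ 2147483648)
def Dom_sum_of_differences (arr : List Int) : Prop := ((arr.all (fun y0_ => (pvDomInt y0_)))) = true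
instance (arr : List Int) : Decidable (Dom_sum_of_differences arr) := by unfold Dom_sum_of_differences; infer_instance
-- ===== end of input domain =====

-- B replaces A's quadratic nested loops with the closed form arr[0] + (len(arr)-1)*sum(arr[1:]).

-- ===== PORT A =====
-- index = arr[0]; for a in arr[1:]: index -= a; for i in arr[:]: index += a; return index
def sum_of_differences (arr : List Int) : Int :=
  let index := (PySem.List.pyGet? arr 0).getD 0   -- arr[0]; none (IndexError) excluded by Pre_
  if 0 < arr.length then
    (PySem.List.slice arr (some 1) none).foldl
      (fun idx a => arr.foldl (fun idx _ => idx + a) (idx - a)) index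
  else 0   -- Python returns None here; unreachable inside Pre_ (arr[0] already raised)

-- ===== PORT B =====
def sum_of_differences_alt (arr : List Int) : Int :=
  (PySem.List.pyGet? arr 0).getD 0 + ((arr.length : Int) - 1) * (PySem.List.slice arr (some 1) none).sum

-- ===== PRECONDITION & SPEC =====
-- A (and B) raise IndexError on the empty list (arr[0]); Pre_ excludes exactly that.
def Pre_sum_of_differences (arr : List Int) : Prop := arr ≠ []
instance (arr : List Int) : Decidable (Pre_sum_of_differences arr) := by unfold Pre_sum_of_differences; infer_instance
def pvWitness_sum_of_differences : List Int := ([3, -1, 4])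

def Spec_sum_of_differences (arr : List Int) (out : Int) : Prop := out = sum_of_differences_alt arr
instance (arr : List Int) (out : Int) : Decidable (Spec_sum_of_differences arr out) := by unfold Spec_sum_of_differences; infer_instance

-- ===== CLAIM (what is proved, stated in full; the proofs are below) =====
def Claim_equal_sum_of_differences : Prop := ∀ (arr : List Int), Dom_sum_of_differences arr → Pre_sum_of_differences arr → Spec_sum_of_differences arr (sum_of_differences arr)

-- ===== LEMMAS AND PROOFS =====

-- inner loop: adding a once per element of l
theorem inner_loop_eq (l : List Int) (a s : Int) :
    l.foldl (fun idx _ => idx + a) s = s + (l.length : Int) * a := by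
  induction l generalizing s with
  | nil => simp
  | cons x t ih => simp [List.foldl, ih]; ring

-- outer loop over the tail
theorem outer_loop_eq (t : List Int) (arr : List Int) (s : Int) :
    t.foldl (fun idx a => arr.foldl (fun idx _ => idx + a) (idx - a)) s
      = s + ((arr.length : Int) - 1) * t.sum := by
  induction t generalizing s with
  | nil => simp
  | cons x r ih =>
      rw [List.foldl_cons, ih, inner_loop_eq, List.sum_cons]
      ring

-- ===== VERDICT (by name: the statement is the Claim_ definition above) =====
theorem sum_of_differences_spec : Claim_equal_sum_of_differences := by
  intro arr _ hpre
  unfold Spec_sum_of_differences sum_of_differences sum_of_differences_alt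
  have hlen : 0 < arr.length := List.length_pos_iff.mpr hpre
  simp only [if_pos hlen, outer_loop_eq]
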